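-- pv_equiv track=rewrite | github.com/extragithub/aoc-2020 | 07/puzzle.py | held_by
-- ===== SOURCE A (Python) =====
-- def held_by(held, bag, containers=None):
--     if containers is None:
--         containers = set()
--
--     if not bag in held:
--         return containers
--
--     for parent in held[bag]:
--         containers.add(parent)
--         held_by(held, parent, containers)
--
--     return containers
-- ===== SOURCE B (Python) =====
-- def held_by(held, bag, containers=None):
--     out = set() if containers is None else containers
--     visited = set()
--
--     def dfs(node):
--         if node in visited:
--             return
--         visited.add(node)
--         for parent in held.get(node, ()):
--             out.add(parent)
--             dfs(parent)
--
--     dfs(bag)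
--     return out
-- ===== Notes on version B (the rewrite author's own statement) =====
-- stated objective: alternative
-- what changed: B adds a visited set and skips nodes already expanded, replacing A's naive DFS (which re-expands a node once per path reaching it) with a visit-each-node-once traversal.
import Mathlib
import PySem

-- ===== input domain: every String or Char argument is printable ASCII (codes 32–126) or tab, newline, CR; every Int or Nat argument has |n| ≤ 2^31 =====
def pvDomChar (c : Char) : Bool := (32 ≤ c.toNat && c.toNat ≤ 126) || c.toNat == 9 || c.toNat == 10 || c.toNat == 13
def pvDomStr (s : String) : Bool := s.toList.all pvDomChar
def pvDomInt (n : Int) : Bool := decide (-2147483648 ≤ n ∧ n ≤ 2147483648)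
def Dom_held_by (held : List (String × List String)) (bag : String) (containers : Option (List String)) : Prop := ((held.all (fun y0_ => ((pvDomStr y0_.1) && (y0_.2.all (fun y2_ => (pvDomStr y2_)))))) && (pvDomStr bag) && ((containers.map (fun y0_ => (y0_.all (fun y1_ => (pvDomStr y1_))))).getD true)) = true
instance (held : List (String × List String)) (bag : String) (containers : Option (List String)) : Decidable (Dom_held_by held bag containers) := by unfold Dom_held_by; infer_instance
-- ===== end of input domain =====

-- B replaces A's naive DFS (which re-expands a node every time another path reaches it) by a
-- DFS that marks each node visited once and skips it afterwards; return values agree (proved below).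

-- ===== PORT A =====
-- A's Python recursion is unbounded; the fuel argument only makes it total in Lean.  Under
-- Pre_held_by (no cycle reachable from bag) fuel `held.length + 1` is never exhausted (proved below).
def heldByA (held : List (String × List String)) : Nat → String → List String → List String
  | 0, _, containers => containers
  | fuel+1, bag, containers =>
    match List.lookup bag held with
    | none => containers
    | some parents =>
      parents.foldl (fun containers parent =>
        heldByA held fuel parent (PySem.Set.add containers parent)) containers

def held_by (held : List (String × List String)) (bag : String) (containers : Option (List String)) : List String :=
  heldByA held (held.length + 1) bag
    (match containers with | none => ([] : List String) | some s => PySem.Set.ofList s)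

-- ===== PORT B =====
-- B's recursion always terminates (the visited set grows at each real call); the fuel bound
-- `(number of parent occurrences) + 2` always dominates the recursion depth.
def heldByB (held : List (String × List String)) : Nat → String → List String → List String → List String × List String
  | 0, _, visited, out => (visited, out)
  | fuel+1, node, visited, out =>
    if node ∈ visited then (visited, out)
    else
      ((List.lookup node held).getD []).foldl
        (fun s parent => heldByB held fuel parent s.1 (PySem.Set.add s.2 parent))
        (PySem.Set.add visited node, out)

def held_by_alt (held : List (String × List String)) (bag : String) (containers : Option (List String)) : List String :=
  (heldByB held ((held.flatMap (fun kv => kv.2)).length + 2) bag []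
    (match containers with | none => ([] : List String) | some s => PySem.Set.ofList s)).2

-- ===== PRECONDITION & SPEC =====
-- parents of a node (Python `held[x]` / `held.get(x, ())`, empty when x is not a key)
def pvParents (held : List (String × List String)) (x : String) : List String :=
  (List.lookup x held).getD []

-- one round of following every parent edge out of the set S
def pvExpand (held : List (String × List String)) (S : List String) : List String :=
  S.foldl (fun acc x => PySem.Set.update acc (pvParents held x)) S

-- everything reachable from S in at most n parent steps
def pvReach (held : List (String × List String)) : Nat → List String → List String
  | 0, S => S
  | n+1, S => pvReach held n (pvExpand held S)

-- Pre_ excludes exactly the inputs on which a cycle of `held` is reachable from `bag`: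
-- there A's unbounded recursion never returns (Python RecursionError).
def Pre_held_by (held : List (String × List String)) (bag : String) (containers : Option (List String)) : Prop :=
  ∀ x ∈ pvReach held (held.length + 2) [bag],
    x ∉ pvReach held (held.length + 2) (pvParents held x)
instance (held : List (String × List String)) (bag : String) (containers : Option (List String)) : Decidable (Pre_held_by held bag containers) := by unfold Pre_held_by; infer_instance

def pvWitness_held_by : (List (String × List String)) × String × Option (List String) :=
  ([("shiny gold", ["bright white", "muted yellow"]), ("bright white", ["light red"])], "shiny gold", none)

def Spec_held_by (held : List (String × List String)) (bag : String) (containers : Option (List String)) (out : List String) : Prop := out = held_by_alt held bag containers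
instance (held : List (String × List String)) (bag : String) (containers : Option (List String)) (out : List String) : Decidable (Spec_held_by held bag containers out) := by unfold Spec_held_by; infer_instance

-- ===== CLAIM (what is proved, stated in full; the proofs are below) =====
def Claim_equal_held_by : Prop := ∀ (held : List (String × List String)) (bag : String) (containers : Option (List String)), Dom_held_by held bag containers → Pre_held_by held bag containers → Spec_held_by held bag containers (held_by held bag containers)


-- ===== LEMMAS AND PROOFS =====

lemma pv_lookup_mem {β : Type} (a : String) (b : β) :
    ∀ (l : List (String × β)), List.lookup a l = some b → (a, b) ∈ l := by
  intro l
  induction l with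
  | nil => intro h; simp [List.lookup] at h
  | cons kv t ih =>
    intro h
    obtain ⟨k, v⟩ := kv
    by_cases hk : a = k
    · subst hk
      simp [List.lookup] at h
      subst h
      exact List.mem_cons_self ..
    · have hb2 : (a == k) = false := beq_eq_false_iff_ne.mpr hk
      have h' : List.lookup a t = some b := by
        simpa [List.lookup, hb2] using h
      exact List.mem_cons_of_mem _ (ih h')

lemma pv_parents_sub_E (held : List (String × List String)) (x p : String)
    (hp : p ∈ pvParents held x) : p ∈ held.flatMap (fun kv => kv.2) := by
  unfold pvParents at hp
  cases h : List.lookup x held with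
  | none => rw [h] at hp; simp at hp
  | some ps =>
    rw [h] at hp
    exact List.mem_flatMap.mpr ⟨(x, ps), pv_lookup_mem x ps held h, hp⟩

lemma pv_parent_key (held : List (String × List String)) (x p : String)
    (hp : p ∈ pvParents held x) : x ∈ held.map Prod.fst := by
  unfold pvParents at hp
  cases h : List.lookup x held with
  | none => rw [h] at hp; simp at hp
  | some ps => exact List.mem_map.mpr ⟨(x, ps), pv_lookup_mem x ps held h, rfl⟩

lemma pv_nodup_length_le (l l' : List String) (h : l.Nodup) (hs : l ⊆ l') :
    l.length ≤ l'.length :=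
  (List.subperm_of_subset h hs).length_le

lemma pv_mem_foldl_update (held : List (String × List String)) :
    ∀ (T acc : List String) (y : String),
      (y ∈ T.foldl (fun acc x => PySem.Set.update acc (pvParents held x)) acc) ↔
        (y ∈ acc ∨ ∃ x ∈ T, y ∈ pvParents held x) := by
  intro T
  induction T with
  | nil => simp
  | cons a t ih =>
    intro acc y
    rw [List.foldl_cons, ih]
    simp [PySem.Set.mem_update]
    tauto

lemma pv_mem_expand (held : List (String × List String)) (S : List String) (y : String) :
    y ∈ pvExpand held S ↔ (y ∈ S ∨ ∃ x ∈ S, y ∈ pvParents held x) :=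
  pv_mem_foldl_update held S S y

lemma pv_subset_reach (held : List (String × List String)) :
    ∀ (n : Nat) (S : List String) (x : String), x ∈ S → x ∈ pvReach held n S := by
  intro n
  induction n with
  | zero => intro S x hx; simpa [pvReach] using hx
  | succ n ih =>
    intro S x hx
    show x ∈ pvReach held n (pvExpand held S)
    exact ih _ _ ((pv_mem_expand held S x).mpr (Or.inl hx))

lemma pv_reach_chain (held : List (String × List String)) :
    ∀ (t : List String) (x : String) (S : List String) (n : Nat),
      List.IsChain (fun a b => b ∈ pvParents held a) (x :: t) → x ∈ S → t.length ≤ n →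
      ∀ y ∈ x :: t, y ∈ pvReach held n S := by
  intro t
  induction t with
  | nil =>
    intro x S n _ hx _ y hy
    have : y = x := by simpa using hy
    subst this
    exact pv_subset_reach held n S y hx
  | cons z t' ih =>
    intro x S n hch hx hlen y hy
    cases n with
    | zero => simp at hlen
    | succ n =>
      have hc := List.isChain_cons_cons.mp hch
      have hzS : z ∈ pvExpand held S := (pv_mem_expand held S z).mpr (Or.inr ⟨x, hx, hc.1⟩)
      have hxS : x ∈ pvExpand held S := (pv_mem_expand held S x).mpr (Or.inl hx)
      show y ∈ pvReach held n (pvExpand held S)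
      rcases List.mem_cons.mp hy with rfl | hy'
      · exact pv_subset_reach held n _ y hxS
      · exact ih z (pvExpand held S) n hc.2 hzS (by simp at hlen; omega) y hy'

lemma pv_chain_keys (held : List (String × List String)) :
    ∀ (L : List String), List.IsChain (fun a b => b ∈ pvParents held a) L →
      ∀ a ∈ L.dropLast, a ∈ held.map Prod.fst := by
  intro L
  induction L with
  | nil => simp
  | cons x t ih =>
    intro hch a ha
    cases t with
    | nil => simp at ha
    | cons y t' =>
      have h1 := List.isChain_cons_cons.mp hch
      have hd : (x :: y :: t').dropLast = x :: (y :: t').dropLast := rfl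
      rw [hd] at ha
      rcases List.mem_cons.mp ha with rfl | ha'
      · exact pv_parent_key held a y h1.1
      · exact ih h1.2 a ha'

lemma pv_head?_append_left (l l' : List String) (a : String) (h : l.head? = some a) :
    (l ++ l').head? = some a := by
  cases l with
  | nil => simp at h
  | cons x t => simpa using h

lemma pv_getLast?_append (l2 : List String) (h : l2 ≠ []) (l1 : List String) :
    (l1 ++ l2).getLast? = l2.getLast? := by
  rcases List.eq_nil_or_concat l2 with rfl | ⟨l2', z, rfl⟩
  · exact absurd rfl h
  · rw [List.concat_eq_append, ← List.append_assoc, List.getLast?_concat, List.getLast?_concat]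

-- soundness invariant of B's visited set: every visited node (outside the current call
-- stack X) already has all its parents collected in `out` and visited
def pvASound (held : List (String × List String)) (X v out : List String) : Prop :=
  ∀ x ∈ v, x ∉ X → ∀ p ∈ pvParents held x, p ∈ out ∧ p ∈ v

lemma pvASound_mono_out (held : List (String × List String)) (X v o o' : List String)
    (hsub : ∀ y ∈ o, y ∈ o') (h : pvASound held X v o) : pvASound held X v o' :=
  fun x hx hX p hp => ⟨hsub _ (h x hx hX p hp).1, (h x hx hX p hp).2⟩

lemma pvASound_mono_X (held : List (String × List String)) (X X' v o : List String)
    (hX : X ⊆ X') (h : pvASound held X v o) : pvASound held X' v o :=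
  fun x hx hx' p hp => h x hx (fun hc => hx' (hX hc)) p hp

-- no parent edge out of the end of a simple path from bag may return into the path (Pre_)
lemma pv_no_cycle (held : List (String × List String)) (bag : String)
    (hPre : ∀ x ∈ pvReach held (held.length + 2) [bag],
      x ∉ pvReach held (held.length + 2) (pvParents held x))
    (L : List String)
    (hch : List.IsChain (fun a b => b ∈ pvParents held a) L)
    (hhd : L.head? = some bag) (hnd : L.Nodup)
    (node p : String) (hlast : L.getLast? = some node) (hp : p ∈ pvParents held node) :
    p ∉ L := by
  intro hmem
  have hkeys := pv_chain_keys held L hch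
  have hlen : L.length ≤ held.length + 1 := by
    have h1 : L.dropLast.length ≤ held.length := by
      have := pv_nodup_length_le L.dropLast (held.map Prod.fst)
        (hnd.sublist (List.dropLast_sublist (l := L))) hkeys
      simpa using this
    have h2 : L.dropLast.length = L.length - 1 := by simp
    omega
  obtain ⟨t, rfl⟩ : ∃ t, L = bag :: t := by
    cases L with
    | nil => simp at hhd
    | cons x t =>
      have hx : x = bag := by simpa using hhd
      exact ⟨t, by rw [hx]⟩
  have hpreach : p ∈ pvReach held (held.length + 2) [bag] :=
    pv_reach_chain held t bag [bag] (held.length + 2) hch (by simp)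
      (by simp at hlen; omega) p hmem
  obtain ⟨l1, l2, hL⟩ := List.append_of_mem hmem
  have hcyc : p ∈ pvReach held (held.length + 2) (pvParents held p) := by
    cases l2 with
    | nil =>
      have hconc : bag :: t = l1 ++ [p] := hL
      have hpn : p = node := by
        rw [hconc, List.getLast?_concat] at hlast
        exact Option.some_inj.mp hlast
      exact pv_subset_reach held _ _ p (by rw [hpn] at hp ⊢; exact hp)
    | cons q l2' =>
      have hLL : bag :: t = l1 ++ p :: q :: l2' := hL
      rw [hLL] at hch hlast hlen
      have hch2 : List.IsChain (fun a b => b ∈ pvParents held a) (p :: q :: l2') :=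
        (List.isChain_append.mp hch).2.1
      have hq : q ∈ pvParents held p := (List.isChain_cons_cons.mp hch2).1
      have hch3 : List.IsChain (fun a b => b ∈ pvParents held a) (q :: l2') :=
        (List.isChain_cons_cons.mp hch2).2
      have hlast2 : (q :: l2').getLast? = some node := by
        rw [pv_getLast?_append (p :: q :: l2') (by simp) l1] at hlast
        rw [show p :: q :: l2' = [p] ++ (q :: l2') from rfl,
          pv_getLast?_append (q :: l2') (by simp) [p]] at hlast
        exact hlast
      have hch4 : List.IsChain (fun a b => b ∈ pvParents held a) ((q :: l2') ++ [p]) := by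
        refine List.isChain_append.mpr ⟨hch3, List.isChain_singleton _, ?_⟩
        intro a ha b hb
        rw [hlast2] at ha
        simp at ha hb
        subst_vars
        exact hp
      have := pv_reach_chain held (l2' ++ [p]) q (pvParents held p) (held.length + 2)
        (by simpa using hch4) hq (by simp at hlen ⊢; omega) p (by simp)
      exact this
  exact hPre p hpreach hcyc

-- A is a no-op when started at an already fully processed node
lemma pv_noopA (held : List (String × List String)) (bag : String)
    (hPre : ∀ x ∈ pvReach held (held.length + 2) [bag],
      x ∉ pvReach held (held.length + 2) (pvParents held x)) :
    ∀ (f : Nat) (chain : List String) (node : String) (v out : List String),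
      List.IsChain (fun a b => b ∈ pvParents held a) (chain ++ [node]) →
      (chain ++ [node]).head? = some bag →
      (chain ++ [node]).Nodup →
      pvASound held chain v out → node ∈ v →
      heldByA held f node out = out := by
  intro f
  induction f with
  | zero => intro chain node v out _ _ _ _ _; rfl
  | succ f ih =>
    intro chain node v out hch hhd hnd hAS hnv
    have hnX : node ∉ chain := by
      intro hc
      exact List.disjoint_of_nodup_append hnd hc (by simp)
    have hps := hAS node hnv hnX
    cases hlk : List.lookup node held with
    | none => simp [heldByA, hlk]
    | some ps =>
      have hpsP : pvParents held node = ps := by simp [pvParents, hlk]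
      simp only [heldByA, hlk]
      have aux : ∀ (qs : List String), (∀ p ∈ qs, p ∈ ps) →
          qs.foldl (fun c par => heldByA held f par (PySem.Set.add c par)) out = out := by
        intro qs
        induction qs with
        | nil => intro _; rfl
        | cons p qs' ihq =>
          intro hqs
          have hpp : p ∈ pvParents held node := by rw [hpsP]; exact hqs p (by simp)
          have h1 := hps p hpp
          rw [List.foldl_cons, PySem.Set.add_of_mem h1.1]
          have hpnot : p ∉ chain ++ [node] :=
            pv_no_cycle held bag hPre _ hch hhd hnd node p (by simp) hpp
          have hrec : heldByA held f p out = out := by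
            apply ih (chain ++ [node]) p v out
            · refine List.isChain_append.mpr ⟨hch, List.isChain_singleton _, ?_⟩
              intro a ha b hb
              rw [List.getLast?_concat] at ha
              simp at ha hb
              subst_vars
              exact hpp
            · exact pv_head?_append_left _ [p] bag hhd
            · exact List.Nodup.append hnd (by simp)
                (by intro a ha hb; simp at hb; subst hb; exact hpnot ha)
            · exact pvASound_mono_X held chain (chain ++ [node]) v out
                (fun a ha => List.mem_append_left _ ha) hAS
            · exact h1.2
          rw [hrec]
          exact ihq (fun r hr => hqs r (by simp [hr]))
      exact aux ps (fun _ h => h)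

-- B's call establishes and preserves the soundness invariant
lemma pv_LB (held : List (String × List String)) (bag : String) :
    ∀ (f : Nat) (X : List String) (node : String) (v o : List String),
      v.Nodup →
      (∀ x ∈ v, x = bag ∨ x ∈ held.flatMap (fun kv => kv.2)) →
      (node = bag ∨ node ∈ held.flatMap (fun kv => kv.2)) →
      (held.flatMap (fun kv => kv.2)).length + 2 ≤ f + v.length →
      pvASound held X v o →
      (∀ x ∈ v, x ∈ (heldByB held f node v o).1) ∧
      (∀ x ∈ (heldByB held f node v o).1, x = bag ∨ x ∈ held.flatMap (fun kv => kv.2)) ∧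
      (heldByB held f node v o).1.Nodup ∧
      node ∈ (heldByB held f node v o).1 ∧
      pvASound held X (heldByB held f node v o).1 (heldByB held f node v o).2 ∧
      (∀ y ∈ o, y ∈ (heldByB held f node v o).2) := by
  intro f
  induction f with
  | zero =>
    intro X node v o hnd hU _ hfuel _
    have : v.length ≤ (held.flatMap (fun kv => kv.2)).length + 1 := by
      have := pv_nodup_length_le v (bag :: held.flatMap (fun kv => kv.2)) hnd
        (fun x hx => by rcases hU x hx with h | h <;> simp [h])
      simpa using this
    omega
  | succ f ih =>
    intro X node v o hnd hU hnodeU hfuel hAS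
    by_cases hnv : node ∈ v
    · simp only [heldByB, if_pos hnv]
      exact ⟨fun x hx => hx, hU, hnd, hnv, hAS, fun y hy => hy⟩
    · simp only [heldByB, if_neg hnv]
      have hv1nd : (PySem.Set.add v node).Nodup := PySem.Set.nodup_add v node hnd
      have hv1mem : ∀ x, x ∈ PySem.Set.add v node ↔ x ∈ v ∨ x = node := by
        intro x; exact PySem.Set.mem_add v node x
      have aux : ∀ (qs : List String), (∀ p ∈ qs, p ∈ held.flatMap (fun kv => kv.2)) →
          ∀ (w oo : List String), w.Nodup →
            (∀ x ∈ w, x = bag ∨ x ∈ held.flatMap (fun kv => kv.2)) →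
            node ∈ w →
            (held.flatMap (fun kv => kv.2)).length + 2 ≤ f + w.length →
            pvASound held (node :: X) w oo →
            (∀ x ∈ w, x ∈ (qs.foldl (fun s parent => heldByB held f parent s.1 (PySem.Set.add s.2 parent)) (w, oo)).1) ∧
            (∀ x ∈ (qs.foldl (fun s parent => heldByB held f parent s.1 (PySem.Set.add s.2 parent)) (w, oo)).1, x = bag ∨ x ∈ held.flatMap (fun kv => kv.2)) ∧
            (qs.foldl (fun s parent => heldByB held f parent s.1 (PySem.Set.add s.2 parent)) (w, oo)).1.Nodup ∧
            pvASound held (node :: X) (qs.foldl (fun s parent => heldByB held f parent s.1 (PySem.Set.add s.2 parent)) (w, oo)).1 (qs.foldl (fun s parent => heldByB held f parent s.1 (PySem.Set.add s.2 parent)) (w, oo)).2 ∧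
            (∀ q ∈ qs, q ∈ (qs.foldl (fun s parent => heldByB held f parent s.1 (PySem.Set.add s.2 parent)) (w, oo)).2 ∧ q ∈ (qs.foldl (fun s parent => heldByB held f parent s.1 (PySem.Set.add s.2 parent)) (w, oo)).1) ∧
            (∀ y ∈ oo, y ∈ (qs.foldl (fun s parent => heldByB held f parent s.1 (PySem.Set.add s.2 parent)) (w, oo)).2) := by
        intro qs
        induction qs with
        | nil =>
          intro _ w oo hwnd hwU hnw _ hAS'
          exact ⟨fun x hx => hx, hwU, hwnd, hAS', by simp, fun y hy => hy⟩
        | cons p qs' ihq =>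
          intro hqs w oo hwnd hwU hnw hwfuel hAS'
          have hpE : p ∈ held.flatMap (fun kv => kv.2) := hqs p (by simp)
          have hcall := ih (node :: X) p w (PySem.Set.add oo p) hwnd hwU (Or.inr hpE) hwfuel
            (pvASound_mono_out held (node :: X) w oo (PySem.Set.add oo p)
              (fun y hy => (PySem.Set.mem_add _ _ _).mpr (Or.inl hy)) hAS')
          obtain ⟨c1, c2, c3, c4, c5, c6⟩ := hcall
          have hlenw : w.length ≤ (heldByB held f p w (PySem.Set.add oo p)).1.length :=
            pv_nodup_length_le w _ hwnd (fun x hx => c1 x hx)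
          have hrest := ihq (fun r hr => hqs r (by simp [hr]))
            (heldByB held f p w (PySem.Set.add oo p)).1
            (heldByB held f p w (PySem.Set.add oo p)).2
            c3 c2 (c1 node hnw) (by omega) c5
          obtain ⟨d1, d2, d3, d4, d5, d6⟩ := hrest
          rw [List.foldl_cons]
          refine ⟨fun x hx => d1 _ (c1 x hx), d2, d3, d4, ?_, fun y hy => d6 _ (c6 y ((PySem.Set.mem_add _ _ _).mpr (Or.inl hy)))⟩
          intro q hq
          rcases List.mem_cons.mp hq with rfl | hq'
          · exact ⟨d6 _ (c6 q ((PySem.Set.mem_add _ _ _).mpr (Or.inr rfl))), d1 _ c4⟩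
          · exact (d5 q hq')
      have hmain := aux ((List.lookup node held).getD [])
        (fun p hp => pv_parents_sub_E held node p hp)
        (PySem.Set.add v node) o hv1nd
        (fun x hx => by
          rcases (hv1mem x).mp hx with h | rfl
          · exact hU x h
          · exact hnodeU)
        ((hv1mem node).mpr (Or.inr rfl))
        (by
          have : (PySem.Set.add v node).length = v.length + 1 := by
            rw [PySem.Set.add_of_not_mem hnv]; simp
          omega)
        (by
          intro x hx hxX p hp
          have hxv : x ∈ v := by
            rcases (hv1mem x).mp hx with h | rfl
            · exact h
            · exact absurd (by simp : x ∈ x :: X) hxX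
          have := hAS x hxv (fun hc => hxX (by simp [hc])) p hp
          exact ⟨this.1, (hv1mem p).mpr (Or.inl this.2)⟩)
      obtain ⟨e1, e2, e3, e4, e5, e6⟩ := hmain
      refine ⟨fun x hx => e1 x ((hv1mem x).mpr (Or.inl hx)), e2, e3,
        e1 node ((hv1mem node).mpr (Or.inr rfl)), ?_, e6⟩
      intro x hx hxX p hp
      by_cases hxn : x = node
      · subst hxn
        exact e5 p hp
      · exact e4 x hx (by simp [hxn, hxX]) p hp
  
-- the main simulation: A's naive traversal equals B's visited-set traversal
lemma pv_main (held : List (String × List String)) (bag : String)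
    (hPre : ∀ x ∈ pvReach held (held.length + 2) [bag],
      x ∉ pvReach held (held.length + 2) (pvParents held x)) :
    ∀ (fA fB : Nat) (chain : List String) (node : String) (v o : List String),
      List.IsChain (fun a b => b ∈ pvParents held a) (chain ++ [node]) →
      (chain ++ [node]).head? = some bag →
      (chain ++ [node]).Nodup →
      held.length + 1 ≤ fA + chain.length →
      (held.flatMap (fun kv => kv.2)).length + 2 ≤ fB + v.length →
      v.Nodup →
      (∀ x ∈ v, x = bag ∨ x ∈ held.flatMap (fun kv => kv.2)) →
      (node = bag ∨ node ∈ held.flatMap (fun kv => kv.2)) →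
      pvASound held chain v o →
      heldByA held fA node o = (heldByB held fB node v o).2 := by
  intro fA
  induction fA with
  | zero =>
    intro fB chain node v o hch hhd hnd hfA _ _ _ _ _
    have hkeys : ∀ a ∈ chain, a ∈ held.map Prod.fst := by
      intro a ha
      exact pv_chain_keys held (chain ++ [node]) hch a (by rw [List.dropLast_concat]; exact ha)
    have : chain.length ≤ held.length := by
      have := pv_nodup_length_le chain (held.map Prod.fst)
        (List.Nodup.of_append_left hnd) hkeys
      simpa using this
    omega
  | succ fA ih =>
    intro fB chain node v o hch hhd hnd hfA hfB hvnd hvU hnodeU hAS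
    have hvlen : v.length ≤ (held.flatMap (fun kv => kv.2)).length + 1 := by
      have := pv_nodup_length_le v (bag :: held.flatMap (fun kv => kv.2)) hvnd
        (fun x hx => by rcases hvU x hx with h | h <;> simp [h])
      simpa using this
    cases fB with
    | zero => omega
    | succ fB =>
      by_cases hnv : node ∈ v
      · simp only [heldByB, if_pos hnv]
        exact pv_noopA held bag hPre (fA + 1) chain node v o hch hhd hnd hAS hnv
      · simp only [heldByB, if_neg hnv]
        have hv1mem : ∀ x, x ∈ PySem.Set.add v node ↔ x ∈ v ∨ x = node := by
          intro x; exact PySem.Set.mem_add v node x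
        have hnX : node ∉ chain := by
          intro hc
          exact List.disjoint_of_nodup_append hnd hc (by simp)
        cases hlk : List.lookup node held with
        | none => simp [heldByA, hlk]
        | some ps =>
          have hpsP : pvParents held node = ps := by simp [pvParents, hlk]
          simp only [heldByA, hlk, Option.getD_some]
          have aux : ∀ (qs : List String), (∀ p ∈ qs, p ∈ ps) →
              ∀ (w oo : List String), w.Nodup →
                (∀ x ∈ w, x = bag ∨ x ∈ held.flatMap (fun kv => kv.2)) →
                node ∈ w →
                (held.flatMap (fun kv => kv.2)).length + 2 ≤ fB + w.length →
                pvASound held (chain ++ [node]) w oo →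
                qs.foldl (fun c par => heldByA held fA par (PySem.Set.add c par)) oo =
                  (qs.foldl (fun s parent => heldByB held fB parent s.1 (PySem.Set.add s.2 parent)) (w, oo)).2 := by
            intro qs
            induction qs with
            | nil => intro _ w oo _ _ _ _ _; rfl
            | cons p qs' ihq =>
              intro hqs w oo hwnd hwU hnw hwfuel hAS'
              have hpp : p ∈ pvParents held node := by rw [hpsP]; exact hqs p (by simp)
              have hpE : p ∈ held.flatMap (fun kv => kv.2) := pv_parents_sub_E held node p hpp
              have hpnot : p ∉ chain ++ [node] :=
                pv_no_cycle held bag hPre _ hch hhd hnd node p (by simp) hpp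
              have hchp : List.IsChain (fun a b => b ∈ pvParents held a) ((chain ++ [node]) ++ [p]) := by
                refine List.isChain_append.mpr ⟨hch, List.isChain_singleton _, ?_⟩
                intro a ha b hb
                rw [List.getLast?_concat] at ha
                simp at ha hb
                subst_vars
                exact hpp
              have hndp : ((chain ++ [node]) ++ [p]).Nodup :=
                List.Nodup.append hnd (by simp)
                  (by intro a ha hb; simp at hb; subst hb; exact hpnot ha)
              have hEq : heldByA held fA p (PySem.Set.add oo p) =
                  (heldByB held fB p w (PySem.Set.add oo p)).2 := by
                apply ih fB (chain ++ [node]) p w (PySem.Set.add oo p) hchp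
                  (pv_head?_append_left _ [p] bag hhd) hndp
                  (by simp only [List.length_append, List.length_cons, List.length_nil]; omega) hwfuel hwnd hwU (Or.inr hpE)
                  (pvASound_mono_out held (chain ++ [node]) w oo (PySem.Set.add oo p)
                    (fun y hy => (PySem.Set.mem_add _ _ _).mpr (Or.inl hy)) hAS')
              have hLB := pv_LB held bag fB (chain ++ [node]) p w (PySem.Set.add oo p)
                hwnd hwU (Or.inr hpE) hwfuel
                (pvASound_mono_out held (chain ++ [node]) w oo (PySem.Set.add oo p)
                  (fun y hy => (PySem.Set.mem_add _ _ _).mpr (Or.inl hy)) hAS')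
              obtain ⟨c1, c2, c3, c4, c5, c6⟩ := hLB
              have hlenw : w.length ≤ (heldByB held fB p w (PySem.Set.add oo p)).1.length :=
                pv_nodup_length_le w _ hwnd (fun x hx => c1 x hx)
              rw [List.foldl_cons, List.foldl_cons, hEq]
              exact ihq (fun r hr => hqs r (by simp [hr]))
                (heldByB held fB p w (PySem.Set.add oo p)).1
                (heldByB held fB p w (PySem.Set.add oo p)).2
                c3 c2 (c1 node hnw) (by omega) c5
          have hv1nd : (PySem.Set.add v node).Nodup := PySem.Set.nodup_add v node hvnd
          exact aux ps (fun _ h => h) (PySem.Set.add v node) o hv1nd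
            (fun x hx => by
              rcases (hv1mem x).mp hx with h | rfl
              · exact hvU x h
              · exact hnodeU)
            ((hv1mem node).mpr (Or.inr rfl))
            (by
              have : (PySem.Set.add v node).length = v.length + 1 := by
                rw [PySem.Set.add_of_not_mem hnv]; simp
              omega)
            (by
              intro x hx hxX p hp
              have hxv : x ∈ v := by
                rcases (hv1mem x).mp hx with h | rfl
                · exact h
                · exact absurd (by simp : x ∈ chain ++ [x]) hxX
              have := hAS x hxv (fun hc => hxX (List.mem_append_left _ hc)) p hp
              exact ⟨this.1, (hv1mem p).mpr (Or.inl this.2)⟩)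
  
-- ===== VERDICT (by name: the statement is the Claim_ definition above) =====
theorem held_by_spec : Claim_equal_held_by := by
  intro held bag containers _ hPre
  unfold Spec_held_by held_by held_by_alt
  exact pv_main held bag hPre _ _ [] bag [] _
    (List.isChain_singleton bag) rfl (by simp) (by simp) (by simp) (by simp)
    (by simp) (Or.inl rfl) (by intro x hx; simp at hx)
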